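-- pv_equiv track=rewrite | github.com/GLion31023/LeetCode | daily/nov_24/del_char_to_make_it_fancy.py | make_fancy_str
-- ===== SOURCE A (Python) =====
-- def make_fancy_str(s: str) -> str:
--     result = s[0]
--     count = 1
--
--     for c in s[1:]:
--         if c != result[-1]:
--             count = 1
--             result += c
--         else:
--             if count == 2:
--                 continue
--             count += 1
--             result += c
--
--     return result
-- ===== SOURCE B (Python) =====
-- def make_fancy_str(s: str) -> str:
--     # Run-based two-pointer scan: keep at most 2 chars of each maximal run.
--     parts = []
--     i, n = 0, len(s)
--     while i < n:
--         j = i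
--         while j < n and s[j] == s[i]:
--             j += 1
--         parts.append(s[i] * min(j - i, 2))
--         i = j
--     return ''.join(parts)
-- ===== Notes on version B (the rewrite author's own statement) =====
-- stated objective: alternative
-- what changed: Replaces A's per-character state machine (running count + compare with result[-1]) by a run-based two-pointer scan that emits min(run length, 2) copies of each maximal run's character, joined at the end.
-- outside the precondition, e.g. on make_fancy_str(''): A raises IndexError, B returns ''
-- crash fix: On the empty string A raises IndexError (s[0]); B returns ''. — e.g. on make_fancy_str(""): A raises IndexError, B returns ""
import Mathlib
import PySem

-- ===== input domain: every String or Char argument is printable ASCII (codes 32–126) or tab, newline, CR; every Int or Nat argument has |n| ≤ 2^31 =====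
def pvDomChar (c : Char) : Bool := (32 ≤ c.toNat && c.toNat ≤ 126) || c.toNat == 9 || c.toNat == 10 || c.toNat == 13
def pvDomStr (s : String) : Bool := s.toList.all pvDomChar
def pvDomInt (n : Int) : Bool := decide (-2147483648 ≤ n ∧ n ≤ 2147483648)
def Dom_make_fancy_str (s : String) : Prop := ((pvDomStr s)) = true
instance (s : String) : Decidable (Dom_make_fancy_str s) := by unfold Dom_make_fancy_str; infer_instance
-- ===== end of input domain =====

-- B replaces A's per-character count state machine by a run-based scan; return values
-- proved equal on nonempty strings (A raises IndexError on "").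

-- ===== PORT A =====
-- one loop step of A: state = (result, count)
def pvAStep (st : List Char × Nat) (c : Char) : List Char × Nat :=
  let (result, count) := st
  if result.getLast? ≠ some c then (result ++ [c], 1)
  else if count = 2 then (result, count)
  else (result ++ [c], count + 1)

def make_fancy_str (s : String) : String :=
  match s.toList with
  | [] => ""          -- s[0] raises IndexError in Python; excluded by Pre_make_fancy_str
  | h :: t => String.mk ((t.foldl pvAStep ([h], 1)).1)

-- ===== PORT B =====
-- Source B's outer while loop; the inner while (advance j over the run) is takeWhile/dropWhile
def pvRuns : List Char → List Char
  | [] => []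
  | h :: t =>
      (h :: (t.takeWhile (· == h)).take 1) ++ pvRuns (t.dropWhile (· == h))
termination_by l => l.length
decreasing_by
  exact Nat.lt_succ_of_le (List.length_dropWhile_le _ _)

def make_fancy_str_alt (s : String) : String := String.mk (pvRuns s.toList)

-- ===== PRECONDITION & SPEC =====
-- Pre_ excludes exactly the empty string, where A raises IndexError on s[0].
def Pre_make_fancy_str (s : String) : Prop := s ≠ ""
instance (s : String) : Decidable (Pre_make_fancy_str s) := by unfold Pre_make_fancy_str; infer_instance
def pvWitness_make_fancy_str : String := "aabbbc"

-- On the empty string A raises IndexError (s[0]); B returns ''.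
def Raises_make_fancy_str (s : String) : Prop := s = ""
instance (s : String) : Decidable (Raises_make_fancy_str s) := by unfold Raises_make_fancy_str; infer_instance
def pvRaiseWitness_make_fancy_str : String := ""
def pvRaiseWitnessOut_make_fancy_str : String := ""

def Spec_make_fancy_str (s : String) (out : String) : Prop := out = make_fancy_str_alt s
instance (s : String) (out : String) : Decidable (Spec_make_fancy_str s out) := by unfold Spec_make_fancy_str; infer_instance

-- ===== CLAIM (what is proved, stated in full; the proofs are below) =====
def Claim_equal_make_fancy_str : Prop := ∀ (s : String), Dom_make_fancy_str s → Pre_make_fancy_str s → Spec_make_fancy_str s (make_fancy_str s)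
def Claim_raises_make_fancy_str : Prop := (∀ (s : String), Dom_make_fancy_str s → Raises_make_fancy_str s → ¬ Pre_make_fancy_str s) ∧ (Dom_make_fancy_str (pvRaiseWitness_make_fancy_str) ∧ Raises_make_fancy_str (pvRaiseWitness_make_fancy_str) ∧ make_fancy_str_alt (pvRaiseWitness_make_fancy_str) = pvRaiseWitnessOut_make_fancy_str)

-- ===== LEMMAS AND PROOFS =====

-- main invariant: folding A's step from state (res, cnt) with last res = d
theorem pvFold_runs (t : List Char) : ∀ (res : List Char) (d : Char) (cnt : Nat),
    res.getLast? = some d → (cnt = 1 ∨ cnt = 2) →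
    (t.foldl pvAStep (res, cnt)).1 =
      res ++ (if cnt = 1 then (t.takeWhile (· == d)).take 1 else [])
          ++ pvRuns (t.dropWhile (· == d)) := by
  induction t with
  | nil =>
      intro res d cnt _ _
      simp only [List.foldl_nil, List.takeWhile_nil, List.dropWhile_nil, List.take_nil]
      rw [pvRuns.eq_1]
      simp
  | cons c t' ih =>
      intro res d cnt hlast hcnt
      by_cases hcd : c = d
      · subst hcd
        rcases hcnt with h1 | h2
        · subst h1
          have hstep : pvAStep (res, 1) c = (res ++ [c], 2) := by
            simp [pvAStep, hlast]
          rw [List.foldl_cons, hstep,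
              ih (res ++ [c]) c 2 (by simp) (Or.inr rfl)]
          simp [List.dropWhile]
        · subst h2
          have hstep : pvAStep (res, 2) c = (res, 2) := by
            simp [pvAStep, hlast]
          rw [List.foldl_cons, hstep,
              ih res c 2 hlast (Or.inr rfl)]
          simp [List.dropWhile]
      · have hne : res.getLast? ≠ some c := by
          rw [hlast]; simp [Ne, hcd]; intro h; exact hcd h.symm
        have hstep : pvAStep (res, cnt) c = (res ++ [c], 1) := by
          simp [pvAStep, hne]
        rw [List.foldl_cons, hstep,
            ih (res ++ [c]) c 1 (by simp) (Or.inl rfl)]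
        have hbeq : (c == d) = false := by simp [hcd]
        have h1 : List.dropWhile (· == d) (c :: t') = c :: t' := by
          simp [hbeq]
        have h2 : List.takeWhile (· == d) (c :: t') = [] := by
          simp [hbeq]
        rw [h1, h2, pvRuns.eq_2]
        simp

theorem pvList_eq (l : List Char) :
    (match l with
      | [] => ""
      | h :: t => String.mk ((t.foldl pvAStep ([h], 1)).1)) = String.mk (pvRuns l) := by
  cases l with
  | nil =>
      show ("" : String) = String.mk (pvRuns [])
      rw [pvRuns.eq_1]
      rfl
  | cons h t =>
      simp only []
      rw [pvFold_runs t [h] h 1 (by simp) (Or.inl rfl)]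
      rw [pvRuns.eq_2]
      simp

-- ===== VERDICT (by name: the statement is the Claim_ definition above) =====
theorem make_fancy_str_spec : Claim_equal_make_fancy_str := by
  intro s _ _
  unfold Spec_make_fancy_str make_fancy_str make_fancy_str_alt
  exact pvList_eq s.toList

@[simp] theorem make_fancy_str_raises : Claim_raises_make_fancy_str := by
  unfold Claim_raises_make_fancy_str
  refine ⟨fun s _ h hp => hp h, by decide, by decide, ?_⟩
  show String.mk (pvRuns "".toList) = ""
  rw [show ("" : String).toList = [] from rfl, pvRuns.eq_1]
  rfl
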